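-- pv_equiv track=rewrite | github.com/kibartas/AOC | 18/wip.py | should_explode
-- ===== SOURCE A (Python) =====
-- def should_explode(number):
--     pair_counter = 0
--     for i in range(0, len(number)):
--         if number[i] == '[':
--             pair_counter += 1
--         elif number[i] == ']':
--             pair_counter -= 1
--         elif pair_counter == 5:
--             return True, i
--     return False, 0
-- ===== SOURCE B (Python) =====
-- def should_explode(number):
--     # Build the nesting-depth table (depth before each character) by a prefix sum,
--     # then scan the (char, depth) pairs for the first non-bracket char at depth 5.
--     depths = [0]
--     for c in number:
--         depths.append(depths[-1] + (c == '[') - (c == ']'))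
--     for i, (c, d) in enumerate(zip(number, depths)):
--         if c not in '[]' and d == 5:
--             return True, i
--     return False, 0
-- ===== Notes on version B (the rewrite author's own statement) =====
-- stated objective: alternative
-- what changed: B precomputes a prefix-sum depth table in one pass and then searches the zipped (char, depth) pairs for the first non-bracket character at depth 5, instead of A's single index loop that mutates a counter while deciding.
import Mathlib
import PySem

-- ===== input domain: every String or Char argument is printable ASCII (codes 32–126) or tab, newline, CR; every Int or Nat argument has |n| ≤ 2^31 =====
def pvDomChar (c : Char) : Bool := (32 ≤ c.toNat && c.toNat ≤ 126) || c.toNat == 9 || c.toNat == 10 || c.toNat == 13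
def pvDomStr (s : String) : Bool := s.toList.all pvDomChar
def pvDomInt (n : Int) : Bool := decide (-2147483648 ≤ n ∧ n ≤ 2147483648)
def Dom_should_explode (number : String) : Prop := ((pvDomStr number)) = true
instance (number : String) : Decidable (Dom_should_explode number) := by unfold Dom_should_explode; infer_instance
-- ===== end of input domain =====

-- B builds a prefix-sum depth table then searches (char, depth) pairs; same value as A (alternative decomposition).

-- ===== PORT A =====
-- A's loop over range(0, len(number)) indexing number[i] = the obvious structural
-- recursion over the characters carrying the index i and the counter pair_counter.
def pvGoA : List Char → Int → Int → Bool × Int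
  | [], _, _ => (false, 0)
  | c :: cs, i, pc =>
      if c = '[' then pvGoA cs (i + 1) (pc + 1)
      else if c = ']' then pvGoA cs (i + 1) (pc - 1)
      else if pc = 5 then (true, i)
      else pvGoA cs (i + 1) pc

def should_explode (number : String) : Bool × Int := pvGoA number.toList 0 0

-- ===== PORT B =====
-- delta of one char: (c == '[') - (c == ']') as Python bools-as-ints
def pvDelta (c : Char) : Int := (if c = '[' then 1 else 0) - (if c = ']' then 1 else 0)

-- depths.append loop: running depth after each character (Python's depths[1:])
def pvBuildDepths : List Char → Int → List Int
  | [], _ => []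
  | c :: cs, d => (d + pvDelta c) :: pvBuildDepths cs (d + pvDelta c)

-- second loop: enumerate(zip(number, depths))
def pvFindB : List (Char × Int) → Int → Bool × Int
  | [], _ => (false, 0)
  | (c, d) :: rest, i =>
      if (¬ (c = '[' ∨ c = ']')) ∧ d = 5 then (true, i)
      else pvFindB rest (i + 1)

def should_explode_alt (number : String) : Bool × Int :=
  pvFindB (number.toList.zip (0 :: pvBuildDepths number.toList 0)) 0

-- ===== PRECONDITION & SPEC =====
def Spec_should_explode (number : String) (out : Bool × Int) : Prop := out = should_explode_alt number
instance (number : String) (out : Bool × Int) : Decidable (Spec_should_explode number out) := by unfold Spec_should_explode; infer_instance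

-- ===== CLAIM (what is proved, stated in full; the proofs are below) =====
def Claim_equal_should_explode : Prop := ∀ (number : String), Dom_should_explode number → Spec_should_explode number (should_explode number)

-- ===== LEMMAS AND PROOFS =====
theorem pvGoA_eq_findB (cs : List Char) (i pc : Int) :
    pvGoA cs i pc = pvFindB (cs.zip (pc :: pvBuildDepths cs pc)) i := by
  induction cs generalizing i pc with
  | nil => simp [pvGoA, pvFindB]
  | cons c cs ih =>
      by_cases hl : c = '['
      · simp [pvGoA, pvBuildDepths, pvFindB, pvDelta, hl, ih]
      · by_cases hr : c = ']'
        · simp [pvGoA, pvBuildDepths, pvFindB, pvDelta, hr, sub_eq_add_neg, ih]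
        · by_cases h5 : pc = 5
          · simp [pvGoA, pvBuildDepths, pvFindB, pvDelta, hl, hr, h5]
          · simp [pvGoA, pvBuildDepths, pvFindB, pvDelta, hl, hr, h5, ih]

-- ===== VERDICT (by name: the statement is the Claim_ definition above) =====
theorem should_explode_spec : Claim_equal_should_explode := by
  intro number _
  unfold Spec_should_explode should_explode should_explode_alt
  exact pvGoA_eq_findB number.toList 0 0
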